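-- pv_equiv track=rewrite | github.com/M-0-N-K/100-algorithms-challange-python | alphabetSubSequence.py | alphabetSubsequence
-- ===== SOURCE A (Python) =====
-- def alphabetSubsequence(sequence):
--     alphabetSequence= 'abcdefghijklmnopqrstuvwxyz'
--     index=0
--     for i in range(len(sequence)):
--         if(sequence[i] in alphabetSequence[index:]):
--             index=alphabetSequence.find(sequence[i])+1
--         else:
--             return False
--     return True
-- ===== SOURCE B (Python) =====
-- def alphabetSubsequence(sequence):
--     # lowercase-only check + "equals its sorted, deduplicated self" = strictly increasing
--     return all('a' <= c <= 'z' for c in sequence) and list(sequence) == sorted(set(sequence))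
-- ===== Notes on version B (the rewrite author's own statement) =====
-- stated objective: simpler
-- what changed: Replaces A's index-advancing scan over alphabet slices (substring membership + find per character) with a one-line characterisation: every char is an ASCII lowercase letter and the string equals its own sorted, deduplicated form.
import Mathlib
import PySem

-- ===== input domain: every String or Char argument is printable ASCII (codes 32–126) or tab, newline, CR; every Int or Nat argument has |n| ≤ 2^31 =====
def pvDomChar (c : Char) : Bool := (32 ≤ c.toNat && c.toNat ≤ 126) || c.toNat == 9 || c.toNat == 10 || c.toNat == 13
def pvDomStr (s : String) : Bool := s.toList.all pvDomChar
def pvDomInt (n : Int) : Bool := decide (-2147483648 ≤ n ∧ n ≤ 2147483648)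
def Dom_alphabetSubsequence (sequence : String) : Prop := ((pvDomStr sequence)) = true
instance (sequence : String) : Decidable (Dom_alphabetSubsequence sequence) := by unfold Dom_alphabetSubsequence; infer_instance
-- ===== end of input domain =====

-- B is a simpler re-implementation: instead of A's index-advancing scan over alphabet
-- slices, B checks every char is ASCII lowercase and the string equals its sorted,
-- deduplicated self.

-- ===== PORT A =====
-- the for-loop over range(len(sequence)), reading sequence[i] in order, with early return False
def alphabetSubsequenceLoop (alphabetSequence : String) : List Char → Int → Bool
  | [], _ => true
  | c :: rest, index =>
    if PySem.Str.isIn (String.singleton c) (PySem.Str.slice alphabetSequence (some index) none) then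
      alphabetSubsequenceLoop alphabetSequence rest (PySem.Str.find alphabetSequence (String.singleton c) + 1)
    else
      false

def alphabetSubsequence (sequence : String) : Bool :=
  alphabetSubsequenceLoop "abcdefghijklmnopqrstuvwxyz" sequence.toList 0

-- ===== PORT B =====
def alphabetSubsequence_alt (sequence : String) : Bool :=
  sequence.toList.all (fun c => 'a' ≤ c && c ≤ 'z') &&
    (sequence.toList == PySem.List.sorted (PySem.Set.ofList sequence.toList) (fun x => x) false)

-- ===== PRECONDITION & SPEC =====
def Spec_alphabetSubsequence (sequence : String) (out : Bool) : Prop := out = alphabetSubsequence_alt sequence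
instance (sequence : String) (out : Bool) : Decidable (Spec_alphabetSubsequence sequence out) := by unfold Spec_alphabetSubsequence; infer_instance

-- ===== CLAIM (what is proved, stated in full; the proofs are below) =====
def Claim_equal_alphabetSubsequence : Prop := ∀ (sequence : String), Dom_alphabetSubsequence sequence → Spec_alphabetSubsequence sequence (alphabetSubsequence sequence)

-- ===== LEMMAS AND PROOFS =====

-- the intermediate spec both ports are reduced to: every char is lowercase with code
-- point ≥ 97 + n, strictly increasing
def pvChk : Nat → List Char → Bool
  | _, [] => true
  | n, c :: rest =>
    (decide (97 + n ≤ c.toNat) && decide (c.toNat ≤ 122)) && pvChk (c.toNat - 96) rest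

theorem pv_char_lt_iff {a b : Char} : a < b ↔ a.toNat < b.toNat := by
  rw [Char.lt_def]; exact UInt32.lt_iff_toNat_lt

theorem pv_char_le_iff {a b : Char} : a ≤ b ↔ a.toNat ≤ b.toNat := by
  rw [Char.le_def]; exact UInt32.le_iff_toNat_le

theorem pv_singleton_infix_iff {c : Char} {l : List Char} : [c] <:+: l ↔ c ∈ l := by
  constructor
  · intro h
    exact h.sublist.subset (List.mem_singleton_self c)
  · intro h
    obtain ⟨s, t, rfl⟩ := List.append_of_mem h
    exact ⟨s, t, by simp⟩

theorem pv_notin_alpha {c : Char} (h : c.toNat < 97 ∨ 122 < c.toNat) :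
    c ∉ "abcdefghijklmnopqrstuvwxyz".toList := by
  intro hm
  have hl : "abcdefghijklmnopqrstuvwxyz".toList =
      ['a','b','c','d','e','f','g','h','i','j','k','l','m','n','o','p','q','r','s','t','u','v','w','x','y','z'] := by decide
  rw [hl] at hm
  simp only [List.mem_cons, List.not_mem_nil, or_false] at hm
  rcases hm with rfl|rfl|rfl|rfl|rfl|rfl|rfl|rfl|rfl|rfl|rfl|rfl|rfl|rfl|rfl|rfl|rfl|rfl|rfl|rfl|rfl|rfl|rfl|rfl|rfl|rfl <;>
    revert h <;> decide

theorem pv_find_alpha {c : Char} (h1 : 97 ≤ c.toNat) (h2 : c.toNat ≤ 122) :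
    PySem.Str.find "abcdefghijklmnopqrstuvwxyz" (String.singleton c) = ((c.toNat : Int) - 97) := by
  have hc : Char.ofNat c.toNat = c := Char.ofNat_toNat c
  set m := c.toNat with hm
  clear_value m
  subst hc
  interval_cases m <;> decide

theorem pv_get_alpha {c : Char} (h1 : 97 ≤ c.toNat) (h2 : c.toNat ≤ 122) :
    "abcdefghijklmnopqrstuvwxyz".toList[c.toNat - 97]? = some c := by
  have hc : Char.ofNat c.toNat = c := Char.ofNat_toNat c
  set m := c.toNat with hm
  clear_value m
  subst hc
  interval_cases m <;> decide

-- membership in a dropped tail of a duplicate-free list is a bound on the position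
theorem pv_mem_drop {α : Type} {l : List α} (hnd : l.Nodup) {p : Nat} {c : α}
    (hp : p < l.length) (hc : l[p]? = some c) (n : Nat) : c ∈ l.drop n ↔ n ≤ p := by
  have hc' : l[p] = c := by
    have := List.getElem?_eq_getElem hp
    rw [this] at hc; exact Option.some.inj hc
  constructor
  · intro h
    obtain ⟨i, hi, hie⟩ := List.getElem_of_mem h
    rw [List.getElem_drop] at hie
    have hlen : n + i < l.length := by
      simp only [List.length_drop] at hi; omega
    have : n + i = p := (List.Nodup.getElem_inj_iff hnd).mp (by rw [hie, hc'])
    omega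
  · intro h
    have hlt : p - n < (l.drop n).length := by
      simp only [List.length_drop]; omega
    have he : (l.drop n)[p - n] = c := by
      rw [List.getElem_drop]
      have : n + (p - n) = p := by omega
      simp only [this]; exact hc'
    exact he ▸ List.getElem_mem hlt

-- the membership test 'sequence[i] in alphabetSequence[index:]' characterised
theorem pv_isIn_iff {c : Char} (h1 : 97 ≤ c.toNat) (h2 : c.toNat ≤ 122) (n : Nat) :
    PySem.Str.isIn (String.singleton c)
        (PySem.Str.slice "abcdefghijklmnopqrstuvwxyz" (some (n : Int)) none) = true
      ↔ 97 + n ≤ c.toNat := by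
  rw [PySem.Str.isIn_iff_infix]
  have hs : (String.singleton c).toList = [c] := by simp
  rw [hs, pv_singleton_infix_iff, PySem.Str.toList_slice, PySem.Chars.slice_eq_listSlice,
    PySem.List.slice_from_natCast]
  have hnd : "abcdefghijklmnopqrstuvwxyz".toList.Nodup := by decide
  have hp : c.toNat - 97 < "abcdefghijklmnopqrstuvwxyz".toList.length := by
    have : "abcdefghijklmnopqrstuvwxyz".toList.length = 26 := by decide
    omega
  rw [pv_mem_drop hnd hp (pv_get_alpha h1 h2) n]
  omega

theorem pv_isIn_false {c : Char} (h : c.toNat < 97 ∨ 122 < c.toNat) (i : Int) :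
    PySem.Str.isIn (String.singleton c)
        (PySem.Str.slice "abcdefghijklmnopqrstuvwxyz" (some i) none) = false := by
  rw [← Bool.not_eq_true, PySem.Str.isIn_iff_infix]
  intro habs
  have hs : (String.singleton c).toList = [c] := by simp
  rw [hs, pv_singleton_infix_iff] at habs
  have hmem2 : c ∈ "abcdefghijklmnopqrstuvwxyz".toList := by
    rw [PySem.Str.toList_slice, PySem.Chars.slice_eq_listSlice] at habs
    exact PySem.List.mem_of_mem_slice _ _ _ habs
  exact pv_notin_alpha h hmem2

-- A's loop computes pvChk
theorem pv_loop_eq_chk (cs : List Char) (n : Nat) :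
    alphabetSubsequenceLoop "abcdefghijklmnopqrstuvwxyz" cs (n : Int) = pvChk n cs := by
  induction cs generalizing n with
  | nil => rfl
  | cons c rest ih =>
    by_cases hlc : 97 ≤ c.toNat ∧ c.toNat ≤ 122
    · obtain ⟨h1, h2⟩ := hlc
      rw [alphabetSubsequenceLoop, pvChk]
      by_cases hge : 97 + n ≤ c.toNat
      · rw [if_pos ((pv_isIn_iff h1 h2 n).mpr hge), pv_find_alpha h1 h2]
        have hcast : ((c.toNat : Int) - 97) + 1 = ((c.toNat - 96 : Nat) : Int) := by omega
        rw [hcast, ih _]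
        simp [hge, h2]
      · rw [if_neg (fun habs => hge ((pv_isIn_iff h1 h2 n).mp habs))]
        simp [hge]
    · have hnot : c.toNat < 97 ∨ 122 < c.toNat := by omega
      rw [alphabetSubsequenceLoop, pvChk, pv_isIn_false hnot]
      rcases hnot with h | h
      · have h' : ¬ (97 + n ≤ c.toNat) := by omega
        simp [h']
      · have h' : ¬ (c.toNat ≤ 122) := by omega
        simp [h']

-- pvChk says: all codes ≤ 122 and, with the char 96 + n prepended, strictly increasing
theorem pv_chk_iff (cs : List Char) (n : Nat) (hn : n ≤ 26) :
    pvChk n cs = true ↔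
      (∀ c ∈ cs, c.toNat ≤ 122) ∧ List.Pairwise (· < ·) (Char.ofNat (96 + n) :: cs) := by
  induction cs generalizing n with
  | nil => simp [pvChk]
  | cons c rest ih =>
    have hbase : (Char.ofNat (96 + n)).toNat = 96 + n := by
      rw [Char.toNat_ofNat]
      have hv : (96 + n).isValidChar := Or.inl (by omega)
      simp [hv]
    rw [pvChk, Bool.and_eq_true, Bool.and_eq_true, decide_eq_true_iff, decide_eq_true_iff,
      List.pairwise_cons, List.pairwise_cons]
    constructor
    · intro ⟨⟨hge, hle⟩, hrest⟩
      obtain ⟨hub, hpw⟩ := (ih (c.toNat - 96) (by omega)).mp hrest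
      have hcn : Char.ofNat (96 + (c.toNat - 96)) = c := by
        have he : 96 + (c.toNat - 96) = c.toNat := by omega
        rw [he]; exact Char.ofNat_toNat c
      rw [hcn, List.pairwise_cons] at hpw
      obtain ⟨hcx, hpwr⟩ := hpw
      refine ⟨?_, ?_, hcx, hpwr⟩
      · intro x hx
        rcases List.mem_cons.mp hx with rfl | hx
        · exact hle
        · exact hub x hx
      · intro b hb
        rcases List.mem_cons.mp hb with rfl | hb
        · exact pv_char_lt_iff.mpr (by omega)
        · exact lt_trans (pv_char_lt_iff.mpr (by omega)) (hcx b hb)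
    · intro ⟨hub, hbc, hcx, hpwr⟩
      have hltc : 96 + n < c.toNat := by
        have := pv_char_lt_iff.mp (hbc c (by simp))
        omega
      have hcle : c.toNat ≤ 122 := hub c (by simp)
      refine ⟨⟨by omega, hcle⟩, ?_⟩
      rw [ih (c.toNat - 96) (by omega)]
      have hcn : Char.ofNat (96 + (c.toNat - 96)) = c := by
        have he : 96 + (c.toNat - 96) = c.toNat := by omega
        rw [he]; exact Char.ofNat_toNat c
      rw [hcn, List.pairwise_cons]
      exact ⟨fun x hx => hub x (by simp [hx]), hcx, hpwr⟩

-- B's second conjunct is strict increase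
theorem pv_sorted_set_iff (cs : List Char) :
    cs = PySem.List.sorted (PySem.Set.ofList cs) (fun x => x) false ↔ cs.Pairwise (· < ·) := by
  constructor
  · intro h
    rw [h]
    exact PySem.List.sorted_ofList_pairwise_lt cs
  · intro h
    have hnd : cs.Nodup := h.imp (fun hlt => ne_of_lt hlt)
    rw [PySem.Set.ofList_eq_self_of_nodup _ hnd]
    exact (PySem.List.sorted_eq_self_of_pairwise _ _ (h.imp (fun hlt => le_of_lt hlt))).symm

-- the two characterisations agree
theorem pv_chk_eq_alt (cs : List Char) :
    pvChk 0 cs = ((cs.all fun c => 'a' ≤ c && c ≤ 'z') &&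
      (cs == PySem.List.sorted (PySem.Set.ofList cs) (fun x => x) false)) := by
  rw [Bool.eq_iff_iff, pv_chk_iff cs 0 (by omega), Bool.and_eq_true, List.all_eq_true,
    beq_iff_eq, pv_sorted_set_iff, List.pairwise_cons]
  have ha : ('a').toNat = 97 := by decide
  have hz : ('z').toNat = 122 := by decide
  have h96 : (Char.ofNat (96 + 0)).toNat = 96 := by decide
  constructor
  · intro ⟨hub, hlb, hpw⟩
    refine ⟨?_, hpw⟩
    intro c hc
    have h1 : 96 < c.toNat := by
      have := pv_char_lt_iff.mp (hlb c hc)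
      omega
    rw [Bool.and_eq_true]
    exact ⟨decide_eq_true (pv_char_le_iff.mpr (by omega)),
           decide_eq_true (pv_char_le_iff.mpr (by have := hub c hc; omega))⟩
  · intro ⟨hall, hpw⟩
    have hlh : ∀ c ∈ cs, 97 ≤ c.toNat ∧ c.toNat ≤ 122 := by
      intro c hc
      have := hall c hc
      rw [Bool.and_eq_true] at this
      have h1 := pv_char_le_iff.mp (of_decide_eq_true this.1)
      have h2 := pv_char_le_iff.mp (of_decide_eq_true this.2)
      omega
    refine ⟨fun c hc => (hlh c hc).2, ?_, hpw⟩
    intro c hc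
    exact pv_char_lt_iff.mpr (by have := (hlh c hc).1; omega)

-- ===== VERDICT (by name: the statement is the Claim_ definition above) =====
theorem alphabetSubsequence_spec : Claim_equal_alphabetSubsequence := by
  intro sequence _
  unfold Spec_alphabetSubsequence alphabetSubsequence alphabetSubsequence_alt
  have h0 : (0 : Int) = ((0 : Nat) : Int) := rfl
  rw [h0, pv_loop_eq_chk sequence.toList 0, pv_chk_eq_alt]
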